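-- pv_equiv track=rewrite | github.com/JakeEhrlich/SlimDiffy | slimdiffy/webasm.py | _encode_signed_leb128
-- ===== SOURCE A (Python) =====
-- def _encode_signed_leb128(value):
--     # Encode signed LEB128
--     result = []
--     while True:
--         byte = value & 0x7f
--         value >>= 7
--         if (value == 0 and byte & 0x40 == 0) or (value == -1 and byte & 0x40 != 0):
--             result.append(byte)
--             break
--         byte |= 0x80
--         result.append(byte)
--     return result
-- ===== SOURCE B (Python) =====
-- def _encode_signed_leb128(value):
--     # Compute the exact number of LEB128 bytes from the two's-complement bit width,
--     # then emit the bytes with one indexed pass.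
--     bits = (value.bit_length() if value >= 0 else (~value).bit_length()) + 1
--     n = max(1, -(-bits // 7))
--     return [((value >> (7 * i)) & 0x7f) | (0x80 if i != n - 1 else 0) for i in range(n)]
-- ===== Notes on version B (the rewrite author's own statement) =====
-- stated objective: alternative
-- what changed: A's while loop that re-tests the sign/continuation condition after every seven-bit shift is replaced by computing the exact byte count up front from the value's two's-complement bit width (bit_length of value or ~value, plus a sign bit, ceil-divided by seven) and then emitting all bytes in a single indexed comprehension.
import Mathlib
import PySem

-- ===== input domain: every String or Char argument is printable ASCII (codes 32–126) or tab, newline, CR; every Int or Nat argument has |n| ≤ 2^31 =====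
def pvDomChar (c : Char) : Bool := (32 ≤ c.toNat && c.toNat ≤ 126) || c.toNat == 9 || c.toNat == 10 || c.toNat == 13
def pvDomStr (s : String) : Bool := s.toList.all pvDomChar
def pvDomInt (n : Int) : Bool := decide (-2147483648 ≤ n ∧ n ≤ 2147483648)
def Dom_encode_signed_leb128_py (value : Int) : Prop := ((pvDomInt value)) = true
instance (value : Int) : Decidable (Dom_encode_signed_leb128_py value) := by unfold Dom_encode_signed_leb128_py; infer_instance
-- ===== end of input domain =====

-- B replaces A's sign-test-terminated while loop by a precomputed byte count (from the two's-complement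
-- bit width) followed by one indexed pass; objective: alternative decomposition, same exact output.


-- ===== PORT A =====
-- 'value & 0x7f' is PySem.Int.band, 'value >>= 7' is Lean's arithmetic '>>>' (Python-exact).
def encode_signed_leb128_py (value : Int) : List Int :=
  let byte := PySem.Int.band value 127
  let value' := value >>> (7 : Nat)
  if (value' = 0 ∧ PySem.Int.band byte 64 = 0) ∨ (value' = -1 ∧ ¬ PySem.Int.band byte 64 = 0) then
    [byte]
  else
    PySem.Int.bor byte 128 :: encode_signed_leb128_py value'
termination_by value.natAbs
decreasing_by
  rename_i h
  rw [Int.shiftRight_eq_div_pow] at *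
  have h0 : value ≠ 0 := by
    rintro rfl; exact h (Or.inl ⟨by decide, by decide⟩)
  have h1 : value ≠ -1 := by
    rintro rfl; exact h (Or.inr ⟨by decide, by decide⟩)
  norm_num
  omega

-- ===== PORT B =====
-- value.bit_length() is PySem.Int.bitLength, '~value' is Int.not; the shift amount 7*i is made a
-- Nat via .toNat, exact since range(n) yields i ≥ 0; the list comprehension is a map over pyRange.
def encode_signed_leb128_py_alt (value : Int) : List Int :=
  let bits : Int := (if 0 ≤ value then (PySem.Int.bitLength value : Int)
                     else (PySem.Int.bitLength (Int.not value) : Int)) + 1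
  let n : Int := max 1 (-(PySem.Int.floordiv (-bits) 7))
  (PySem.List.pyRange 0 n 1).map (fun i =>
    PySem.Int.bor (PySem.Int.band (value >>> (7 * i).toNat) 127)
      (if i ≠ n - 1 then 128 else 0))

-- ===== PRECONDITION & SPEC =====
def Spec_encode_signed_leb128_py (value : Int) (out : List Int) : Prop := out = encode_signed_leb128_py_alt value
instance (value : Int) (out : List Int) : Decidable (Spec_encode_signed_leb128_py value out) := by unfold Spec_encode_signed_leb128_py; infer_instance

-- ===== CLAIM (what is proved, stated in full; the proofs are below) =====
def Claim_equal_encode_signed_leb128_py : Prop := ∀ (value : Int), Dom_encode_signed_leb128_py value → Spec_encode_signed_leb128_py value (encode_signed_leb128_py value)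

-- ===== LEMMAS AND PROOFS =====

-- 'value & 0x7f' in Python is PySem.Int.band; it equals Python's value % 128.
theorem pv_band127 (v : Int) : PySem.Int.band v 127 = v % 128 := by
  unfold PySem.Int.band
  rcases v with m | m <;>
    simp only [Int.ofNat_eq_natCast, Int.negSucc_eq] <;> split_ifs with h1 h2
  · have h2 : (Int.toNat (m:Int)) &&& (Int.toNat 127) = m % 128 := by
      have := Nat.and_two_pow_sub_one_eq_mod m 7
      simpa using this
    rw [h2]; omega
  all_goals first
  | omega
  | (have h3 : (-(-((m:Int) + 1)) - 1).toNat = m := by omega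
     rw [h3]
     have h2 : (Int.toNat 127) &&& m = m % 128 := by
       rw [Nat.and_comm]
       have := Nat.and_two_pow_sub_one_eq_mod m 7
       simpa using this
     rw [h2]; omega)


theorem pv_not_eq (n : Int) : Int.not n = -n - 1 := by
  rcases n with m | m <;> simp [Int.not, Int.negSucc_eq]
  omega

-- the number of bytes B emits, as a standalone function of the input
def nLenB (value : Int) : Int :=
  max 1 (-(PySem.Int.floordiv
    (-((if 0 ≤ value then (PySem.Int.bitLength value : Int)
        else (PySem.Int.bitLength (Int.not value) : Int)) + 1)) 7))

theorem alt_unfold (value : Int) :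
    encode_signed_leb128_py_alt value =
      (PySem.List.pyRange 0 (nLenB value) 1).map (fun i =>
        PySem.Int.bor (PySem.Int.band (value >>> (7 * i).toNat) 127)
          (if i ≠ nLenB value - 1 then 128 else 0)) := rfl

theorem pv_band64 (b : Int) (h0 : 0 ≤ b) (h1 : b < 128) :
    (PySem.Int.band b 64 = 0 ↔ b < 64) := by
  rw [PySem.Int.band_of_nonneg h0 (by norm_num)]
  have h2 : b.toNat &&& (Int.toNat 64) = ((b.toNat).testBit 6).toNat * 64 := by
    have := Nat.and_two_pow b.toNat 6
    simpa using this
  rw [h2]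
  have h3 := Nat.testBit_eq_decide_div_mod_eq (x := b.toNat) (i := 6)
  cases h4 : (b.toNat).testBit 6 <;> rw [h4] at h3 <;> simp at h3 ⊢ <;> omega

theorem pv_stop_iff (v : Int) :
    ((v >>> (7:Nat) = 0 ∧ PySem.Int.band (PySem.Int.band v 127) 64 = 0) ∨
     (v >>> (7:Nat) = -1 ∧ ¬ PySem.Int.band (PySem.Int.band v 127) 64 = 0)) ↔
    (-64 ≤ v ∧ v < 64) := by
  rw [Int.shiftRight_eq_div_pow, pv_band127,
    pv_band64 (v % 128) (by omega) (by omega)]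
  norm_num
  omega

theorem bl_le_iff (w : Int) (k : Nat) : PySem.Int.bitLength w ≤ k ↔ w.natAbs < 2^k := by
  constructor
  · intro h
    exact lt_of_lt_of_le (PySem.Int.lt_two_pow_bitLength w) (Nat.pow_le_pow_right (by norm_num) h)
  · intro h
    by_contra hk
    rw [not_le] at hk
    rcases eq_or_ne w 0 with rfl | hw
    · simp [PySem.Int.bitLength_zero] at hk
    · have h2 := PySem.Int.two_pow_bitLength_le w hw
      have h3 : (2:Nat)^k ≤ 2^(PySem.Int.bitLength w - 1) :=
        Nat.pow_le_pow_right (by norm_num) (by omega)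
      omega

theorem nLen_ge_one (v : Int) : 1 ≤ nLenB v := le_max_left _ _

theorem nLen_le_iff (v q : Int) (hq : 1 ≤ q) :
    nLenB v ≤ q ↔ (if 0 ≤ v then v else -v - 1) < ((2:Int)^((7*q-1).toNat)) := by
  unfold nLenB
  set b : Int := (if 0 ≤ v then (PySem.Int.bitLength v : Int)
        else (PySem.Int.bitLength (Int.not v) : Int)) + 1 with hb
  rw [max_le_iff, and_iff_right hq]
  have h1 : -(PySem.Int.floordiv (-b) 7) ≤ q ↔ b ≤ 7*q := by
    rw [neg_le, PySem.Int.le_floordiv_iff_mul_le (by norm_num)]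
    omega
  rw [h1]
  set w : Int := if 0 ≤ v then v else -v - 1 with hw
  have hbw : b = (PySem.Int.bitLength w : Int) + 1 := by
    rw [hb, hw]
    split_ifs with h
    · rfl
    · rw [pv_not_eq]
  have hwnn : 0 ≤ w := by rw [hw]; split_ifs with h <;> omega
  have h2 : b ≤ 7*q ↔ PySem.Int.bitLength w ≤ (7*q-1).toNat := by
    rw [hbw]; omega
  rw [h2, bl_le_iff]
  have h3 : (w.natAbs : Int) = w := by omega
  constructor
  · intro h
    calc w = (w.natAbs : Int) := h3.symm
    _ < ((2^((7*q-1).toNat) : Nat) : Int) := by exact_mod_cast h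
    _ = (2:Int)^((7*q-1).toNat) := by push_cast; ring
  · intro h
    have h4 : (w.natAbs : Int) < ((2^((7*q-1).toNat) : Nat) : Int) := by
      rw [h3]; push_cast; exact h
    exact_mod_cast h4

theorem nLen_eq_one_iff (v : Int) : nLenB v = 1 ↔ (-64 ≤ v ∧ v < 64) := by
  have h := nLen_le_iff v 1 le_rfl
  rw [show ((2:Int)^((7*(1:Int)-1).toNat)) = 64 by decide] at h
  have h1 := nLen_ge_one v
  constructor
  · intro h2
    have h3 := h.mp (by omega)
    split_ifs at h3 <;> omega
  · intro h2
    have h3 : nLenB v ≤ 1 := h.mpr (by split_ifs <;> omega)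
    omega

theorem nLen_step (v : Int) (h : ¬(-64 ≤ v ∧ v < 64)) :
    2 ≤ nLenB v ∧ nLenB (v >>> (7:Nat)) = nLenB v - 1 := by
  have h1 := nLen_ge_one v
  have h2 : 2 ≤ nLenB v := by
    rcases Int.lt_or_le 1 (nLenB v) with h3 | h3
    · omega
    · exact absurd ((nLen_eq_one_iff v).mp (by omega)) h
  refine ⟨h2, ?_⟩
  rw [Int.shiftRight_eq_div_pow]
  norm_num
  set q : Int := nLenB v with hqd
  have hq0 := (nLen_le_iff v q (by omega)).mp le_rfl
  have hpow1 : (2:Int)^((7*q-1).toNat) = 2^((7*(q-1)-1).toNat) * 128 := by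
    rw [show (7*q-1).toNat = (7*(q-1)-1).toNat + 7 from by omega, pow_add]
    norm_num
  set A : Int := (2:Int)^((7*(q-1)-1).toNat) with hAd
  have hA : 0 < A := pow_pos (by norm_num) _
  have hup : nLenB (v / 128) ≤ q - 1 := by
    rw [nLen_le_iff _ (q-1) (by omega)]
    rw [hpow1] at hq0
    split_ifs at hq0 ⊢ <;> omega
  have hlow : ¬ nLenB (v / 128) ≤ q - 2 := by
    intro hc
    rcases Int.lt_or_le (q - 2) 1 with hq2 | hq2
    · have := nLen_ge_one (v / 128); omega
    · rw [nLen_le_iff _ (q-2) hq2] at hc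
      have hpow2 : A = 2^((7*(q-2)-1).toNat) * 128 := by
        rw [hAd, show (7*(q-1)-1).toNat = (7*(q-2)-1).toNat + 7 from by omega, pow_add]
        norm_num
      have hcontra : nLenB v ≤ q - 1 := by
        rw [nLen_le_iff v (q-1) (by omega), ← hAd]
        set B : Int := (2:Int)^((7*(q-2)-1).toNat) with hBd
        have hB : 0 < B := pow_pos (by norm_num) _
        rw [hpow2]
        split_ifs at hc ⊢ <;> omega
      omega
  have := nLen_ge_one (v / 128)
  omega

theorem pv_main (value : Int) : encode_signed_leb128_py value = encode_signed_leb128_py_alt value := by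
  induction value using encode_signed_leb128_py.induct with
  | case1 v _ _ h =>
    have h' : (v >>> (7:Nat) = 0 ∧ PySem.Int.band (PySem.Int.band v 127) 64 = 0) ∨
        (v >>> (7:Nat) = -1 ∧ ¬ PySem.Int.band (PySem.Int.band v 127) 64 = 0) := h
    rw [encode_signed_leb128_py]
    rw [if_pos h']
    have hstop : -64 ≤ v ∧ v < 64 := (pv_stop_iff v).mp h'
    rw [alt_unfold, (nLen_eq_one_iff v).mpr hstop]
    rw [show PySem.List.pyRange 0 1 1 = [(0:Int)] from by decide]
    simp only [List.map_cons, List.map_nil]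
    rw [show ((7:Int) * 0).toNat = (0:Nat) from by decide, Int.shiftRight_natCast_right,
      Int.shiftRight_zero]
    norm_num
  | case2 v _ _ h ih =>
    have h' : ¬ ((v >>> (7:Nat) = 0 ∧ PySem.Int.band (PySem.Int.band v 127) 64 = 0) ∨
        (v >>> (7:Nat) = -1 ∧ ¬ PySem.Int.band (PySem.Int.band v 127) 64 = 0)) := h
    rw [encode_signed_leb128_py]
    rw [if_neg h']
    have hns : ¬(-64 ≤ v ∧ v < 64) := fun hc => h' ((pv_stop_iff v).mpr hc)
    obtain ⟨h2, hstep⟩ := nLen_step v hns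
    rw [ih, alt_unfold, alt_unfold, hstep]
    set n : Int := nLenB v with hnd
    rw [PySem.List.pyRange_one, PySem.List.pyRange_one]
    rw [show ((n - 0).toNat) = ((n - 1 - 0).toNat) + 1 from by omega]
    rw [List.range_succ_eq_map]
    simp only [List.map_cons, List.map_map]
    congr 1
    · -- head byte
      rw [show ((0:Int) + ((0:Nat):Int)) = ((0:Nat):Int) from by norm_num,
        Int.shiftRight_natCast_right]
      norm_num
      rw [if_neg (by omega : ¬ (0:Int) = n - 1)]
    · -- tail bytes
      apply List.map_congr_left
      intro k _
      simp only [Function.comp_apply]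
      rw [Int.shiftRight_natCast_right, Int.shiftRight_natCast_right]
      rw [show (7*((0:Int)+↑(k+1))).toNat = 7 + (7*((0:Int)+↑k)).toNat from by push_cast; omega]
      rw [Int.shiftRight_add]
      simp only [Nat.succ_eq_add_one]
      simp only [show ((0:Int)+↑(k+1) ≠ n - 1) = ((0:Int)+↑k ≠ n - 1 - 1) from
        propext (by push_cast; omega)]
      rfl

-- ===== VERDICT (by name: the statement is the Claim_ definition above) =====
theorem encode_signed_leb128_py_spec : Claim_equal_encode_signed_leb128_py := by
  intro value _
  unfold Spec_encode_signed_leb128_py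
  exact pv_main value
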